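-- pv_equiv track=rewrite | github.com/clemensv/real-time-sources | irceline-belgium/irceline_belgium/irceline_belgium.py | filter_new_observations
-- ===== SOURCE A (Python) =====
-- from typing import Any, Dict, Iterable, List, Optional, Tuple
--
-- def filter_new_observations(
--     timeseries_id: str,
--     values: Iterable[Dict[str, Any]],
--     state: Dict[str, int],
-- ) -> List[Dict[str, Any]]:
--     """Return only values newer than the persisted state and advance the state."""
--     last_seen_timestamp = int(state.get(timeseries_id, 0))
--     new_values: List[Dict[str, Any]] = []
--     max_timestamp = last_seen_timestamp
--
--     for item in sorted(values, key=lambda value: int(value.get("timestamp", 0))):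
--         timestamp = int(item.get("timestamp", 0))
--         if timestamp <= last_seen_timestamp:
--             continue
--         new_values.append(item)
--         max_timestamp = max(max_timestamp, timestamp)
--
--     if max_timestamp > last_seen_timestamp:
--         state[timeseries_id] = max_timestamp
--
--     return new_values
-- ===== SOURCE B (Python) =====
-- from typing import Any, Dict, Iterable, List
--
-- def filter_new_observations(
--     timeseries_id: str,
--     values: Iterable[Dict[str, Any]],
--     state: Dict[str, int],
-- ) -> List[Dict[str, Any]]:
--     """Single online pass: stably insertion-sort only the kept items; advance state from the tail."""
--     threshold = int(state.get(timeseries_id, 0))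
--     kept: List[Dict[str, Any]] = []
--     for item in values:
--         ts = int(item.get("timestamp", 0))
--         if ts > threshold:
--             i = 0
--             while i < len(kept) and int(kept[i].get("timestamp", 0)) <= ts:
--                 i += 1
--             kept.insert(i, item)
--     if kept:
--         state[timeseries_id] = int(kept[-1].get("timestamp", 0))
--     return kept
-- ===== Notes on version B (the rewrite author's own statement) =====
-- stated objective: alternative
-- what changed: A sorts the whole input with the library sort and then loops with a (kept list, running max) accumulator pair; B never calls sort: it makes one online pass inserting each kept item into its sorted position (an insertion sort of only the kept items) and reads the new state timestamp off the tail of the result.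
import Mathlib
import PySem

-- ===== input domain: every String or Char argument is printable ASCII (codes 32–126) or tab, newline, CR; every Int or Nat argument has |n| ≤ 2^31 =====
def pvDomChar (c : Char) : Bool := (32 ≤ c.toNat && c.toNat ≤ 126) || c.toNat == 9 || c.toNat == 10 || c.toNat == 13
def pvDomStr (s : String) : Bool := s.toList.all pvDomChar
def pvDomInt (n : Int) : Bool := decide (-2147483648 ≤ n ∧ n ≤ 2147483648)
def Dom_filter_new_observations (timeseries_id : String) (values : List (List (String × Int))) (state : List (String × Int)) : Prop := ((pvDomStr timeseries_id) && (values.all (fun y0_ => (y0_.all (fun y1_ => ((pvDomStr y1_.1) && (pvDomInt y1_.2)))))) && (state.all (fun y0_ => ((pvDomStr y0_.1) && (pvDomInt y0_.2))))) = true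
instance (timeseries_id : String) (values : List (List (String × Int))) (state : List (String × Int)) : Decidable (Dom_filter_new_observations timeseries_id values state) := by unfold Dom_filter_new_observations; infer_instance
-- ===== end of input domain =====

-- B replaces A's sort-everything-then-filter loop by one online pass that insertion-sorts only the kept items (no library sort, no running max); return-value equivalence (both mutate state identically in Python).


-- ===== PORT A =====
def filter_new_observations (timeseries_id : String) (values : List (List (String × Int))) (state : List (String × Int)) : List (List (String × Int)) :=
  let last_seen_timestamp : Int := PySem.Dict.getD ⟨state⟩ timeseries_id 0
  let r :=
    (PySem.List.sorted values (fun value => PySem.Dict.getD ⟨value⟩ "timestamp" 0)).foldl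
      (fun (acc : List (List (String × Int)) × Int) item =>
        let timestamp : Int := PySem.Dict.getD ⟨item⟩ "timestamp" 0
        if timestamp ≤ last_seen_timestamp then acc
        else (acc.1 ++ [item], max acc.2 timestamp))
      ([], last_seen_timestamp)
  r.1

-- ===== PORT B =====
-- B's while-loop walks `kept` from the front past every entry with key ≤ ts and inserts there;
-- that front scan is exactly PySem.List.insertBy with the strict key comparison.
def filter_new_observations_alt (timeseries_id : String) (values : List (List (String × Int))) (state : List (String × Int)) : List (List (String × Int)) :=
  let threshold : Int := PySem.Dict.getD ⟨state⟩ timeseries_id 0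
  values.foldl
    (fun (kept : List (List (String × Int))) item =>
      let ts : Int := PySem.Dict.getD ⟨item⟩ "timestamp" 0
      if threshold < ts then
        PySem.List.insertBy
          (fun a b => decide (PySem.Dict.getD ⟨a⟩ ("timestamp" : String) 0 < PySem.Dict.getD ⟨b⟩ "timestamp" 0))
          item kept
      else kept)
    []

-- ===== PRECONDITION & SPEC =====
def Spec_filter_new_observations (timeseries_id : String) (values : List (List (String × Int))) (state : List (String × Int)) (out : List (List (String × Int))) : Prop := out = filter_new_observations_alt timeseries_id values state
instance (timeseries_id : String) (values : List (List (String × Int))) (state : List (String × Int)) (out : List (List (String × Int))) : Decidable (Spec_filter_new_observations timeseries_id values state out) := by unfold Spec_filter_new_observations; infer_instance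

-- ===== CLAIM (what is proved, stated in full; the proofs are below) =====
def Claim_equal_filter_new_observations : Prop := ∀ (timeseries_id : String) (values : List (List (String × Int))) (state : List (String × Int)), Dom_filter_new_observations timeseries_id values state → Spec_filter_new_observations timeseries_id values state (filter_new_observations timeseries_id values state)

-- ===== LEMMAS AND PROOFS =====
-- insertBy puts x at the head when the comparison fires against every element
theorem insertBy_all_before {α : Type} (before : α → α → Bool) (x : α) (ys : List α)
    (h : ∀ z ∈ ys, before x z = true) :
    PySem.List.insertBy before x ys = x :: ys := by
  cases ys with
  | nil => rfl
  | cons y t => simp [PySem.List.insertBy, h y (List.mem_cons_self)]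

-- filtering commutes with stable insertion into a key-sorted list
theorem filter_insertBy {α : Type} (key : α → Int) (p : α → Bool) (x : α) (ys : List α)
    (h : ys.Pairwise (fun a b => key a ≤ key b)) :
    (PySem.List.insertBy (fun a b => decide (key a < key b)) x ys).filter p =
      if p x then PySem.List.insertBy (fun a b => decide (key a < key b)) x (ys.filter p)
      else ys.filter p := by
  induction ys with
  | nil => by_cases hx : p x <;> simp [PySem.List.insertBy, hx]
  | cons y t ih =>
    rcases List.pairwise_cons.mp h with ⟨hy, ht⟩
    by_cases hlt : key x < key y
    · by_cases hx : p x
      · by_cases hpy : p y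
        · simp [PySem.List.insertBy, hlt, hx, hpy]
        · have hall : ∀ z ∈ t.filter p, (fun a b => decide (key a < key b)) x z = true := by
            intro z hz
            have := hy z (List.mem_of_mem_filter hz)
            simp; omega
          simp only [PySem.List.insertBy, hlt, decide_true, if_pos, hx, hpy,
            List.filter_cons_of_pos, List.filter_cons_of_neg, Bool.false_eq_true,
            not_false_iff]
          exact (insertBy_all_before _ x _ hall).symm
      · simp [PySem.List.insertBy, hlt, hx]
    · by_cases hx : p x <;> by_cases hpy : p y <;>
        simp [PySem.List.insertBy, hlt, hx, hpy, ih ht]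

-- filtering commutes with Python's stable sort
theorem filter_sorted {α : Type} (key : α → Int) (p : α → Bool) (xs : List α) :
    (PySem.List.sorted xs key).filter p = PySem.List.sorted (xs.filter p) key := by
  induction xs using List.reverseRecOn with
  | nil => rfl
  | append_singleton l x ih =>
    rw [PySem.List.sorted_eq_foldl_insertBy, PySem.List.sorted_eq_foldl_insertBy,
        List.filter_append, List.foldl_append, List.foldl_append,
        ← PySem.List.sorted_eq_foldl_insertBy l key,
        ← PySem.List.sorted_eq_foldl_insertBy (l.filter p) key]
    by_cases hx : p x
    · simp only [hx, List.filter_cons_of_pos, List.filter_nil, List.foldl_cons, List.foldl_nil]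
      rw [filter_insertBy key p x _ (PySem.List.sorted_pairwise l key), hx, if_pos rfl, ih]
    · simp only [hx, List.filter_cons_of_neg, List.filter_nil, List.foldl_cons, List.foldl_nil,
        Bool.false_eq_true, not_false_iff]
      rw [← ih, filter_insertBy key p x _ (PySem.List.sorted_pairwise l key)]
      simp [hx]

-- the first component of A's foldl accumulator is a filter
theorem foldl_fst_eq_filter (last : Int) (l : List (List (String × Int)))
    (acc : List (List (String × Int)) × Int) :
    (l.foldl
      (fun (acc : List (List (String × Int)) × Int) item =>
        let timestamp : Int := PySem.Dict.getD ⟨item⟩ "timestamp" 0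
        if timestamp ≤ last then acc
        else (acc.1 ++ [item], max acc.2 timestamp)) acc).1 =
      acc.1 ++ l.filter (fun v => decide (last < PySem.Dict.getD ⟨v⟩ "timestamp" 0)) := by
  induction l generalizing acc with
  | nil => simp
  | cons x t ih =>
    by_cases hx : PySem.Dict.getD ⟨x⟩ "timestamp" 0 ≤ last
    · rw [List.foldl_cons, List.filter_cons_of_neg (by simp; omega)]
      simp only [hx, if_pos]
      exact ih acc
    · rw [List.foldl_cons, List.filter_cons_of_pos (by simp; omega)]
      simp only [hx, if_neg, not_false_iff]
      rw [ih]
      simp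

-- B's guarded online insertion is the insertion sort of the filtered list
theorem foldl_insert_eq_sorted_filter (last : Int) (l : List (List (String × Int))) :
    l.foldl
      (fun (kept : List (List (String × Int))) item =>
        let ts : Int := PySem.Dict.getD ⟨item⟩ "timestamp" 0
        if last < ts then
          PySem.List.insertBy
            (fun a b => decide (PySem.Dict.getD ⟨a⟩ ("timestamp" : String) 0 < PySem.Dict.getD ⟨b⟩ "timestamp" 0))
            item kept
        else kept)
      [] =
    PySem.List.sorted (l.filter (fun v => decide (last < PySem.Dict.getD ⟨v⟩ "timestamp" 0)))
      (fun v => PySem.Dict.getD ⟨v⟩ "timestamp" 0) := by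
  rw [PySem.List.sorted_eq_foldl_insertBy, List.foldl_filter]
  simp

-- ===== VERDICT (by name: the statement is the Claim_ definition above) =====
theorem filter_new_observations_spec : Claim_equal_filter_new_observations := by
  intro timeseries_id values state _
  unfold Spec_filter_new_observations filter_new_observations filter_new_observations_alt
  simp only [foldl_fst_eq_filter, List.nil_append, filter_sorted,
    foldl_insert_eq_sorted_filter]
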